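-- pv_equiv track=rewrite | github.com/PCATechChallenges/BankTech-Python | BankTech-Python/4-FibonacciStockTrading/_4_FibonacciStockTrading.py | generateFibs
-- ===== SOURCE A (Python) =====
-- def generateFibs(checkpoint, numbersAfter):
--     # Fn = Fn-1 + Fn-2
--     F_n = []
--     F_n_1 = 1
--     F_n_2 = 0
--     listIndex = 0
--
--     while len(F_n) != (numbersAfter + 1):
--
--         # Base calculation for a Fibonacci number
--         fibNumber = F_n_1 + F_n_2
--
--         # If we've reached our starting number, store the fib number
--         if fibNumber >= checkpoint:
--             F_n.insert(listIndex, fibNumber)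
--             listIndex += 1
--
--         # Increment the Fib sequence to the next number
--         F_n_2 = F_n_1
--         F_n_1 = fibNumber
--
--     return F_n
-- ===== SOURCE B (Python) =====
-- def _fib_pair(n):
--     # fast doubling: returns (F(n), F(n+1)) with F(0)=0, F(1)=1
--     if n == 0:
--         return (0, 1)
--     a, b = _fib_pair(n >> 1)
--     c = a * (2 * b - a)
--     d = a * a + b * b
--     if n & 1:
--         return (d, c + d)
--     return (c, d)
--
-- def generateFibs(checkpoint, numbersAfter):
--     # Locate the first Fibonacci index >= 2 whose value reaches the checkpoint
--     # (the emitted sequence is F(2), F(3), ... = 1, 2, 3, 5, ...), by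
--     # exponential search then binary search over fast-doubling evaluations.
--     if _fib_pair(2)[0] >= checkpoint:
--         start = 2
--     else:
--         hi = 4
--         while _fib_pair(hi)[0] < checkpoint:
--             hi *= 2
--         lo = 2
--         while lo + 1 < hi:
--             mid = (lo + hi) // 2
--             if _fib_pair(mid)[0] >= checkpoint:
--                 hi = mid
--             else:
--                 lo = mid
--         start = hi
--     # Emit numbersAfter+1 consecutive Fibonacci numbers from that index.
--     a, b = _fib_pair(start)
--     out = []
--     for _ in range(numbersAfter + 1):
--         out.append(a)
--         a, b = b, a + b
--     return out
-- ===== Notes on version B (the rewrite author's own statement) =====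
-- stated objective: alternative
-- what changed: A advances the Fibonacci recurrence one step at a time inside a single guarded loop; B instead locates the first Fibonacci index whose value reaches the checkpoint by exponential search plus binary search over fast-doubling Fibonacci evaluations, then emits numbersAfter+1 consecutive values from that index.
-- outside the precondition, e.g. on generateFibs(10, -2): A does not finish within the time limit, B returns []
import Mathlib
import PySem

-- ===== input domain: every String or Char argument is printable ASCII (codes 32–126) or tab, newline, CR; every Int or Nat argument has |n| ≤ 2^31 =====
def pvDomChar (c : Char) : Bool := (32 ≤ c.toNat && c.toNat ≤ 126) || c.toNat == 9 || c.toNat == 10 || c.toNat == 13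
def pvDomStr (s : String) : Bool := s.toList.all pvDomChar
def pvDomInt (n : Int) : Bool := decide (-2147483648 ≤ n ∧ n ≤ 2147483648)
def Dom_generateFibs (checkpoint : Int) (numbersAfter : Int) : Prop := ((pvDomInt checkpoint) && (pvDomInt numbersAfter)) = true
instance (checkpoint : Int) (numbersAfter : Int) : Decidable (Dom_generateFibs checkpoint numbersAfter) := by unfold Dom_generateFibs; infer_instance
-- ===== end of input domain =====

-- B replaces A's step-by-step guarded recurrence by fast-doubling Fibonacci evaluation with
-- exponential + binary search for the first value >= checkpoint; equal return values on Pre_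
-- (A diverges for numbersAfter ≤ -2, which Pre_ excludes).

-- ===== PORT A =====
-- A's `while len(F_n) != numbersAfter+1` loop; fuel is only a totality guard
-- (checkpoint.toNat + (numbersAfter+1).toNat steps always suffice on Pre_, as the proof shows).
def loopA (checkpoint target : Int) (acc : List Int) (f1 f2 li : Int) : Nat → List Int
  | 0 => acc
  | fuel + 1 =>
    if (acc.length : Int) ≠ target then
      let fib := f1 + f2
      if fib ≥ checkpoint then
        loopA checkpoint target (PySem.List.insert acc li fib) fib f1 (li + 1) fuel
      else
        loopA checkpoint target acc fib f1 li fuel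
    else acc

def generateFibs (checkpoint : Int) (numbersAfter : Int) : List Int :=
  loopA checkpoint (numbersAfter + 1) [] 1 0 0 (checkpoint.toNat + (numbersAfter + 1).toNat)

-- ===== PORT B =====
-- fast doubling: (F(n), F(n+1)) with F(0)=0, F(1)=1 (port of _fib_pair)
def fibPair (n : Nat) : Int × Int :=
  if h : n = 0 then (0, 1)
  else
    let p := fibPair (n / 2)
    let c := p.1 * (2 * p.2 - p.1)
    let d := p.1 * p.1 + p.2 * p.2
    if n % 2 = 1 then (d, c + d) else (c, d)
decreasing_by exact Nat.div_lt_self (Nat.pos_of_ne_zero h) (by norm_num)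

-- B's `while _fib_pair(hi)[0] < checkpoint: hi *= 2`; fuel is only a totality guard
-- (64 doublings always suffice on Dom, as the proof shows).
def expSearch (checkpoint : Int) (hi : Nat) : Nat → Nat
  | 0 => hi
  | fuel + 1 => if (fibPair hi).1 < checkpoint then expSearch checkpoint (hi * 2) fuel else hi

-- B's `while lo + 1 < hi` binary search; fuel is only a totality guard (hi steps suffice).
def binSearch (checkpoint : Int) (lo hi : Nat) : Nat → Nat
  | 0 => hi
  | fuel + 1 =>
    if lo + 1 < hi then
      let mid := (lo + hi) / 2
      if checkpoint ≤ (fibPair mid).1 then binSearch checkpoint lo mid fuel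
      else binSearch checkpoint mid hi fuel
    else hi

def findIndex (checkpoint : Int) : Nat :=
  if checkpoint ≤ (fibPair 2).1 then 2
  else
    let hi := expSearch checkpoint 4 64
    binSearch checkpoint 2 hi hi

-- B's emit loop: `for _ in range(numbersAfter+1): out.append(a); a, b = b, a+b`
def emitB (a b : Int) : Nat → List Int
  | 0 => []
  | m + 1 => a :: emitB b (a + b) m

def generateFibs_alt (checkpoint : Int) (numbersAfter : Int) : List Int :=
  let p := fibPair (findIndex checkpoint)
  emitB p.1 p.2 (numbersAfter + 1).toNat

-- ===== PRECONDITION & SPEC =====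
-- Pre_ excludes numbersAfter ≤ -2, on which A's while-loop never terminates (len(F_n) can never equal numbersAfter+1 < 0).
def Pre_generateFibs (checkpoint : Int) (numbersAfter : Int) : Prop := -1 ≤ numbersAfter
instance (checkpoint : Int) (numbersAfter : Int) : Decidable (Pre_generateFibs checkpoint numbersAfter) := by unfold Pre_generateFibs; infer_instance
def pvWitness_generateFibs : Int × Int := (10, 4)

def Spec_generateFibs (checkpoint : Int) (numbersAfter : Int) (out : List Int) : Prop := out = generateFibs_alt checkpoint numbersAfter
instance (checkpoint : Int) (numbersAfter : Int) (out : List Int) : Decidable (Spec_generateFibs checkpoint numbersAfter out) := by unfold Spec_generateFibs; infer_instance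

-- ===== CLAIM (what is proved, stated in full; the proofs are below) =====
def Claim_equal_generateFibs : Prop := ∀ (checkpoint : Int) (numbersAfter : Int), Dom_generateFibs checkpoint numbersAfter → Pre_generateFibs checkpoint numbersAfter → Spec_generateFibs checkpoint numbersAfter (generateFibs checkpoint numbersAfter)

-- ===== LEMMAS AND PROOFS =====

-- proof-only helpers: the skip/collect decomposition of A's loop
def skipB (checkpoint : Int) (a b : Int) : Nat → Int × Int
  | 0 => (a, b)
  | fuel + 1 => if a + b < checkpoint then skipB checkpoint b (a + b) fuel else (a, b)

def collectB (a b : Int) : Nat → List Int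
  | 0 => []
  | n + 1 => (a + b) :: collectB b (a + b) n

-- Collect phase: once fib = f1+f2 ≥ checkpoint (with f1 ≥ 1, f2 ≥ 0 the guard stays true),
-- loopA appends exactly the k numbers collectB produces.
theorem loopA_collect (checkpoint target : Int) (k : Nat) :
    ∀ (acc : List Int) (f1 f2 : Int) (fuel : Nat),
      1 ≤ f1 → 0 ≤ f2 → checkpoint ≤ f1 + f2 →
      target = (acc.length : Int) + (k : Int) → k ≤ fuel →
      loopA checkpoint target acc f1 f2 (acc.length : Int) fuel = acc ++ collectB f2 f1 k := by
  induction k with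
  | zero =>
    intro acc f1 f2 fuel h1 h2 hc ht hf
    cases fuel with
    | zero => simp [loopA, collectB]
    | succ m =>
      have : ¬ ((acc.length : Int) ≠ target) := by omega
      simp [loopA, collectB, this]
  | succ k ih =>
    intro acc f1 f2 fuel h1 h2 hc ht hf
    obtain ⟨m, rfl⟩ : ∃ m, fuel = m + 1 := ⟨fuel - 1, by omega⟩
    have hne : (acc.length : Int) ≠ target := by push_cast at ht ⊢; omega
    have hge : f1 + f2 ≥ checkpoint := hc
    rw [loopA]
    rw [if_pos hne, if_pos hge]
    have hins : PySem.List.insert acc ((acc.length : Int)) (f1 + f2) = acc ++ [f1 + f2] := by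
      simpa using PySem.List.insert_natCast acc acc.length (f1 + f2) (le_refl _)
    rw [hins]
    have hlen : ((acc.length : Int)) + 1 = (((acc ++ [f1 + f2]).length : Int)) := by
      simp only [List.length_append, List.length_cons, List.length_nil]; push_cast; omega
    rw [hlen]
    rw [ih (acc ++ [f1 + f2]) (f1 + f2) f1 m (by omega) (by omega) (by omega)
        (by simp at ht ⊢; omega) (by omega)]
    simp [collectB, Int.add_comm]

-- Skip phase: while fib < checkpoint both loops advance the same recurrence;
-- fuelB bounds the skip steps, fuelA ≥ fuelB + k bounds A's total steps.
theorem loopA_skip (checkpoint target : Int) (k : Nat) :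
    ∀ (fuelB : Nat) (a b : Int) (acc : List Int) (fuelA : Nat),
      0 ≤ a → 1 ≤ b →
      target = (acc.length : Int) + (k : Int) →
      fuelB + k ≤ fuelA →
      (checkpoint - (a + b)).toNat ≤ fuelB →
      loopA checkpoint target acc b a (acc.length : Int) fuelA =
        acc ++ collectB (skipB checkpoint a b fuelB).1 (skipB checkpoint a b fuelB).2 k := by
  intro fuelB
  induction fuelB with
  | zero =>
    intro a b acc fuelA ha hb ht hfa hd
    have hc : checkpoint ≤ a + b := by omega
    rw [skipB]
    exact loopA_collect checkpoint target k acc b a fuelA hb ha (by omega) ht (by omega)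
  | succ fb ih =>
    intro a b acc fuelA ha hb ht hfa hd
    by_cases hc : a + b < checkpoint
    · rw [skipB]
      rw [if_pos hc]
      rcases Nat.eq_zero_or_pos k with hk | hk
      · subst hk
        have hne : ¬ ((acc.length : Int) ≠ target) := by omega
        cases fuelA with
        | zero => simp [loopA, collectB]
        | succ m => simp [loopA, collectB, hne]
      · obtain ⟨m, rfl⟩ : ∃ m, fuelA = m + 1 := ⟨fuelA - 1, by omega⟩
        have hne : (acc.length : Int) ≠ target := by omega
        rw [loopA]
        have hge : ¬ (b + a ≥ checkpoint) := by omega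
        rw [if_pos hne, if_neg hge]
        rw [show b + a = a + b from Int.add_comm b a]
        exact ih b (a + b) acc m (by omega) (by omega) ht (by omega) (by omega)
    · rw [skipB]
      rw [if_neg hc]
      exact loopA_collect checkpoint target k acc b a fuelA hb ha (by omega) ht (by omega)

-- fast doubling computes the Fibonacci pair
theorem fibPair_eq (n : Nat) : fibPair n = ((Nat.fib n : Int), (Nat.fib (n + 1) : Int)) := by
  induction n using Nat.strong_induction_on with
  | _ n ih =>
    rw [fibPair]
    by_cases h : n = 0
    · subst h; simp
    · rw [dif_neg h]
      rw [ih (n / 2) (Nat.div_lt_self (Nat.pos_of_ne_zero h) one_lt_two)]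
      set k := n / 2 with hk
      have hle : Nat.fib k ≤ 2 * Nat.fib (k + 1) := by
        have := Nat.fib_le_fib_succ (n := k); omega
      have h1 : (Nat.fib (2 * k) : Int) =
          (Nat.fib k : Int) * (2 * (Nat.fib (k + 1) : Int) - (Nat.fib k : Int)) := by
        have h2m := Nat.fib_two_mul k
        zify [hle] at h2m
        linarith [h2m]
      have h2 : (Nat.fib (2 * k + 1) : Int) =
          (Nat.fib k : Int) * (Nat.fib k : Int) + (Nat.fib (k + 1) : Int) * (Nat.fib (k + 1) : Int) := by
        have h2m := Nat.fib_two_mul_add_one k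
        zify at h2m
        rw [h2m]; ring
      have h3 : (Nat.fib (2 * k + 2) : Int) =
          (Nat.fib (2 * k) : Int) + (Nat.fib (2 * k + 1) : Int) := by
        have := Nat.fib_add_two (n := 2 * k); zify at this; omega
      by_cases hp : n % 2 = 1
      · have hn : n = 2 * k + 1 := by omega
        rw [if_pos hp, hn]
        simp only [Prod.mk.injEq]
        refine ⟨h2.symm, ?_⟩
        rw [show 2 * k + 1 + 1 = 2 * k + 2 by ring, h3, h1, h2]
      · have hn : n = 2 * k := by omega
        rw [if_neg hp, hn]
        simp only [Prod.mk.injEq]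
        exact ⟨h1.symm, h2.symm⟩

theorem fib_ge_sub_one (n : Nat) : n - 1 ≤ Nat.fib n := by
  by_cases h : 5 ≤ n
  · exact le_trans (Nat.sub_le n 1) (Nat.le_fib_self h)
  · have h4 : n ≤ 4 := by omega
    interval_cases n <;> decide

-- exponential search keeps the invariant and lands on an index whose Fibonacci value reaches cp
theorem exp_fib (cp : Int) : ∀ (fuel hi : Nat), 4 ≤ hi → cp ≤ (Nat.fib (hi * 2 ^ fuel) : Int) →
    4 ≤ expSearch cp hi fuel ∧ cp ≤ (Nat.fib (expSearch cp hi fuel) : Int) := by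
  intro fuel
  induction fuel with
  | zero =>
    intro hi h4 hb
    simpa [expSearch] using ⟨h4, by simpa using hb⟩
  | succ f ih =>
    intro hi h4 hb
    rw [expSearch]
    by_cases hc : (fibPair hi).1 < cp
    · rw [if_pos hc]
      exact ih (hi * 2) (by omega) (by rw [show hi * 2 * 2 ^ f = hi * 2 ^ (f + 1) by ring]; exact hb)
    · rw [if_neg hc]
      rw [fibPair_eq] at hc
      exact ⟨h4, by simpa using not_lt.mp hc⟩

-- binary search: maintains fib lo < cp ≤ fib hi, halves the interval, ends at lo+1 = hi
theorem bin_fib (cp : Int) : ∀ (fuel lo hi : Nat), lo < hi → hi - lo ≤ fuel →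
    (Nat.fib lo : Int) < cp → cp ≤ (Nat.fib hi : Int) →
    lo < binSearch cp lo hi fuel ∧ binSearch cp lo hi fuel ≤ hi ∧
    cp ≤ (Nat.fib (binSearch cp lo hi fuel) : Int) ∧
    (Nat.fib (binSearch cp lo hi fuel - 1) : Int) < cp := by
  intro fuel
  induction fuel with
  | zero => intro lo hi h1 h2 _ _; omega
  | succ f ih =>
    intro lo hi h1 h2 hlo hhi
    rw [binSearch]
    by_cases hc : lo + 1 < hi
    · rw [if_pos hc]
      have hm1 : lo < (lo + hi) / 2 := by omega
      have hm2 : (lo + hi) / 2 < hi := by omega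
      by_cases hg : cp ≤ (fibPair ((lo + hi) / 2)).1
      · rw [if_pos hg]
        rw [fibPair_eq] at hg
        have := ih lo ((lo + hi) / 2) hm1 (by omega) hlo (by simpa using hg)
        exact ⟨this.1, by omega, this.2.2⟩
      · rw [if_neg hg]
        rw [fibPair_eq] at hg
        have := ih ((lo + hi) / 2) hi hm2 (by omega) (by simpa using not_le.mp hg) hhi
        exact ⟨by omega, this.2⟩
    · rw [if_neg hc]
      have : hi = lo + 1 := by omega
      subst this
      exact ⟨by omega, le_refl _, hhi, by simpa using hlo⟩

-- the start index found by B: ≥ 2, its Fibonacci value reaches cp, all earlier ones (index ≥ 2) don't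
theorem findIndex_spec (cp : Int) (hcp : cp ≤ 2147483648) :
    2 ≤ findIndex cp ∧ cp ≤ (Nat.fib (findIndex cp) : Int) ∧
    ∀ i, 2 ≤ i → i < findIndex cp → (Nat.fib i : Int) < cp := by
  unfold findIndex
  by_cases h : cp ≤ (fibPair 2).1
  · rw [if_pos h]
    rw [fibPair_eq] at h
    exact ⟨le_refl _, by simpa using h, fun i hi1 hi2 => by omega⟩
  · rw [if_neg h]
    show 2 ≤ binSearch cp 2 (expSearch cp 4 64) (expSearch cp 4 64) ∧
      cp ≤ (Nat.fib (binSearch cp 2 (expSearch cp 4 64) (expSearch cp 4 64)) : Int) ∧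
      ∀ i, 2 ≤ i → i < binSearch cp 2 (expSearch cp 4 64) (expSearch cp 4 64) → (Nat.fib i : Int) < cp
    rw [fibPair_eq] at h
    have hlo2 : (Nat.fib 2 : Int) < cp := by simpa using not_le.mp h
    have hexp : 4 ≤ expSearch cp 4 64 ∧ cp ≤ (Nat.fib (expSearch cp 4 64) : Int) := by
      apply exp_fib cp 64 4 (le_refl _)
      have hle : (4 * 2 ^ 64 : Nat) ≤ Nat.fib (4 * 2 ^ 64) := Nat.le_fib_self (by norm_num)
      have : (2147483648 : Int) ≤ ((4 * 2 ^ 64 : Nat) : Int) := by norm_num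
      calc cp ≤ (2147483648 : Int) := hcp
        _ ≤ ((4 * 2 ^ 64 : Nat) : Int) := this
        _ ≤ (Nat.fib (4 * 2 ^ 64) : Int) := by exact_mod_cast hle
    obtain ⟨hH4, hHfib⟩ := hexp
    have hbin := bin_fib cp (expSearch cp 4 64) 2 (expSearch cp 4 64)
      (by omega) (by omega) hlo2 hHfib
    refine ⟨by omega, hbin.2.2.1, ?_⟩
    intro i hi1 hi2
    calc (Nat.fib i : Int) ≤ (Nat.fib (binSearch cp 2 (expSearch cp 4 64) (expSearch cp 4 64) - 1) : Int) := by
          exact_mod_cast Nat.fib_mono (by omega)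
      _ < cp := hbin.2.2.2

-- A's skip loop started at the pair (fib k, fib (k+1)) lands on (fib (k+d), fib (k+d+1))
theorem skip_fib (cp : Int) : ∀ (d k fuel : Nat), d ≤ fuel →
    (∀ i, k + 2 ≤ i → i < k + 2 + d → (Nat.fib i : Int) < cp) →
    cp ≤ (Nat.fib (k + 2 + d) : Int) →
    skipB cp (Nat.fib k : Int) (Nat.fib (k + 1) : Int) fuel =
      ((Nat.fib (k + d) : Int), (Nat.fib (k + d + 1) : Int)) := by
  intro d
  induction d with
  | zero =>
    intro k fuel _ _ hge
    have hge' : cp ≤ (Nat.fib (k + 2) : Int) := by simpa using hge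
    cases fuel with
    | zero => simp [skipB]
    | succ m =>
      have hsum : ((Nat.fib k : Int)) + (Nat.fib (k + 1) : Int) = (Nat.fib (k + 2) : Int) := by
        have := Nat.fib_add_two (n := k); zify at this; omega
      rw [skipB, if_neg (by rw [hsum]; omega)]
      simp
  | succ d ih =>
    intro k fuel hf hlt hge
    obtain ⟨m, rfl⟩ : ∃ m, fuel = m + 1 := ⟨fuel - 1, by omega⟩
    have hsum : ((Nat.fib k : Int)) + (Nat.fib (k + 1) : Int) = (Nat.fib (k + 2) : Int) := by
      have := Nat.fib_add_two (n := k); zify at this; omega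
    have hguard : (Nat.fib k : Int) + (Nat.fib (k + 1) : Int) < cp := by
      rw [hsum]; exact hlt (k + 2) (le_refl _) (by omega)
    rw [skipB, if_pos hguard, hsum]
    have hrec := ih (k + 1) m (by omega) (fun i h1 h2 => hlt i (by omega) (by omega))
      (by rw [show k + 1 + 2 + d = k + 2 + (d + 1) by ring]; exact hge)
    rw [show k + 1 + 1 = k + 2 by ring, show k + 1 + d = k + (d + 1) by ring] at hrec
    exact hrec

-- A's collect phase equals B's emit phase, shifted by two Fibonacci indices
theorem coll_emit : ∀ (m k : Nat),
    collectB (Nat.fib k : Int) (Nat.fib (k + 1) : Int) m =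
      emitB (Nat.fib (k + 2) : Int) (Nat.fib (k + 3) : Int) m := by
  intro m
  induction m with
  | zero => intro k; rfl
  | succ m ih =>
    intro k
    have hsum : ((Nat.fib k : Int)) + (Nat.fib (k + 1) : Int) = (Nat.fib (k + 2) : Int) := by
      have := Nat.fib_add_two (n := k); zify at this; omega
    have hsum2 : ((Nat.fib (k + 2) : Int)) + (Nat.fib (k + 3) : Int) = (Nat.fib (k + 4) : Int) := by
      have := Nat.fib_add_two (n := k + 2); zify at this
      rw [show k + 2 + 1 = k + 3 by ring, show k + 2 + 2 = k + 4 by ring] at this; omega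
    rw [collectB, emitB, hsum, hsum2]
    have := ih (k + 1)
    rw [show k + 1 + 1 = k + 2 by ring, show k + 1 + 2 = k + 3 by ring, show k + 1 + 3 = k + 4 by ring] at this
    rw [this]

-- ===== VERDICT (by name: the statement is the Claim_ definition above) =====
theorem generateFibs_spec : Claim_equal_generateFibs := by
  intro cp n hdom hpre
  unfold Spec_generateFibs
  have hcp : cp ≤ 2147483648 := by
    unfold Dom_generateFibs pvDomInt at hdom
    simp only [Bool.and_eq_true, decide_eq_true_eq] at hdom
    exact hdom.1.2
  unfold Pre_generateFibs at hpre
  obtain ⟨h2r, hge, hlt⟩ := findIndex_spec cp hcp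
  set r := findIndex cp with hr
  -- fuel bound: r - 2 ≤ cp.toNat
  have hbound : r - 2 ≤ cp.toNat := by
    by_cases h : r ≤ 2
    · omega
    · have hfr : (Nat.fib (r - 1) : Int) < cp := hlt (r - 1) (by omega) (by omega)
      have := fib_ge_sub_one (r - 1)
      omega
  -- A = collect after skip
  have hA : generateFibs cp n =
      collectB (skipB cp 0 1 cp.toNat).1 (skipB cp 0 1 cp.toNat).2 (n + 1).toNat := by
    have h := loopA_skip cp (n + 1) (n + 1).toNat cp.toNat 0 1 [] (cp.toNat + (n + 1).toNat)
      (by omega) (by omega) (by simp; omega) (by omega) (by omega)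
    unfold generateFibs
    simpa using h
  -- the skip lands on (fib (r-2), fib (r-1))
  have hskip : skipB cp 0 1 cp.toNat = ((Nat.fib (r - 2) : Int), (Nat.fib (r - 1) : Int)) := by
    have h := skip_fib cp (r - 2) 0 cp.toNat hbound
      (fun i h1 h2 => hlt i (by omega) (by omega))
      (by rw [show 0 + 2 + (r - 2) = r by omega]; exact hge)
    simp only [Nat.fib_zero, Nat.fib_one, Nat.cast_zero, Nat.cast_one, Nat.zero_add] at h
    rw [h, show r - 2 + 1 = r - 1 by omega]
  rw [hA, hskip]
  unfold generateFibs_alt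
  rw [fibPair_eq, ← hr]
  have h := coll_emit ((n + 1).toNat) (r - 2)
  rw [show r - 2 + 1 = r - 1 by omega, show r - 2 + 2 = r by omega,
      show r - 2 + 3 = r + 1 by omega] at h
  exact h
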